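-- pv_equiv track=rewrite | github.com/mennakhaled898/EscapeRoom | main.py | _p8_tile_hit
-- ===== SOURCE A (Python) =====
-- def _p8_tile_hit(mx, my, ox, W):
--     """Return grid index 0-8 if click hits a tile, else None."""
--     tile_sz = 110
--     gap = 8
--     board_w = 3*tile_sz + 2*gap
--     bx = ox + W//2 - board_w//2
--     by = 210
--     for row in range(3):
--         for col in range(3):
--             tx = bx + col*(tile_sz+gap)
--             ty = by + row*(tile_sz+gap)
--             if tx <= mx <= tx+tile_sz and ty <= my <= ty+tile_sz:
--                 return row*3+col
--     return None
-- ===== SOURCE B (Python) =====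
-- def _p8_tile_hit(mx, my, ox, W):
--     """Return grid index 0-8 if click hits a tile, else None."""
--     tile_sz = 110
--     gap = 8
--     pitch = tile_sz + gap
--     bx = ox + W//2 - (3*tile_sz + 2*gap)//2
--     by = 210
--     col, cr = divmod(mx - bx, pitch)
--     row, rr = divmod(my - by, pitch)
--     if 0 <= col <= 2 and 0 <= row <= 2 and cr <= tile_sz and rr <= tile_sz:
--         return row*3 + col
--     return None
-- ===== Notes on version B (the rewrite author's own statement) =====
-- stated objective: simpler
-- what changed: Replaces the 3x3 nested-loop scan over tile rectangles with a closed-form divmod computation of (row, col) plus a range/gap guard.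
import Mathlib
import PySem

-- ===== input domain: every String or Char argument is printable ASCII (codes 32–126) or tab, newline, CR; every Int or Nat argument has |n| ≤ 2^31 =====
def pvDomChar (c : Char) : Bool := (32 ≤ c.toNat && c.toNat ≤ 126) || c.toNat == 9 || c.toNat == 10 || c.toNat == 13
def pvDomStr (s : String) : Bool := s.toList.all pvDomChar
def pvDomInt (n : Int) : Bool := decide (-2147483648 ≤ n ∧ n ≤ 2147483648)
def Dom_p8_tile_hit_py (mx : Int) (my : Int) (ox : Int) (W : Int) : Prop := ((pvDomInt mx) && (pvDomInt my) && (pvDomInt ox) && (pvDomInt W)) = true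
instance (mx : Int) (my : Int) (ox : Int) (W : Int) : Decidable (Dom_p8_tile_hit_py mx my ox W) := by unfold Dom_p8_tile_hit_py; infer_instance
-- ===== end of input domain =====

-- B replaces A's 3x3 nested-loop rectangle scan with a closed-form divmod computation of (row, col) (simpler, same result).


-- ===== PORT A =====
-- Literal port of A: nested for-loops over range(3) with early return = findSome? over pyRange.
def p8_tile_hit_py (mx : Int) (my : Int) (ox : Int) (W : Int) : Option Int :=
  let tile_sz : Int := 110
  let gap : Int := 8
  let board_w : Int := 3*tile_sz + 2*gap
  let bx : Int := ox + PySem.Int.floordiv W 2 - PySem.Int.floordiv board_w 2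
  let by0 : Int := 210
  (PySem.List.pyRange 0 3 1).findSome? (fun row =>
    (PySem.List.pyRange 0 3 1).findSome? (fun col =>
      let tx := bx + col*(tile_sz+gap)
      let ty := by0 + row*(tile_sz+gap)
      if tx ≤ mx ∧ mx ≤ tx+tile_sz ∧ ty ≤ my ∧ my ≤ ty+tile_sz then some (row*3+col) else none))

-- ===== PORT B =====
-- Port of B: closed-form divmod with range/gap guard; no loop.
def p8_tile_hit_py_alt (mx : Int) (my : Int) (ox : Int) (W : Int) : Option Int :=
  let tile_sz : Int := 110
  let gap : Int := 8
  let pitch : Int := tile_sz + gap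
  let bx : Int := ox + PySem.Int.floordiv W 2 - PySem.Int.floordiv (3*tile_sz + 2*gap) 2
  let by0 : Int := 210
  let col := PySem.Int.floordiv (mx - bx) pitch
  let cr := PySem.Int.mod (mx - bx) pitch
  let row := PySem.Int.floordiv (my - by0) pitch
  let rr := PySem.Int.mod (my - by0) pitch
  if 0 ≤ col ∧ col ≤ 2 ∧ 0 ≤ row ∧ row ≤ 2 ∧ cr ≤ tile_sz ∧ rr ≤ tile_sz then
    some (row*3 + col)
  else none

-- ===== PRECONDITION & SPEC =====
def Spec_p8_tile_hit_py (mx : Int) (my : Int) (ox : Int) (W : Int) (out : Option Int) : Prop := out = p8_tile_hit_py_alt mx my ox W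
instance (mx : Int) (my : Int) (ox : Int) (W : Int) (out : Option Int) : Decidable (Spec_p8_tile_hit_py mx my ox W out) := by unfold Spec_p8_tile_hit_py; infer_instance

-- ===== CLAIM (what is proved, stated in full; the proofs are below) =====
def Claim_equal_p8_tile_hit_py : Prop := ∀ (mx : Int) (my : Int) (ox : Int) (W : Int), Dom_p8_tile_hit_py mx my ox W → Spec_p8_tile_hit_py mx my ox W (p8_tile_hit_py mx my ox W)

-- ===== LEMMAS AND PROOFS =====

-- ===== VERDICT (by name: the statement is the Claim_ definition above) =====
-- key lemma: for u = mx - bx (resp. my - by), the nested scan equals the divmod test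
theorem pv_fd118 (u : Int) : PySem.Int.floordiv u (110 + 8) = u / 118 := by
  rw [show ((110:Int) + 8) = 118 by norm_num, PySem.Int.floordiv_eq_ediv_of_pos (by norm_num)]

theorem pv_md118 (u : Int) : PySem.Int.mod u (110 + 8) = u % 118 := by
  rw [show ((110:Int) + 8) = 118 by norm_num, PySem.Int.mod_eq_emod_of_pos (by norm_num)]

set_option maxHeartbeats 4000000 in
theorem p8_tile_hit_py_spec : Claim_equal_p8_tile_hit_py := by
  intro mx my ox W _
  unfold Spec_p8_tile_hit_py p8_tile_hit_py p8_tile_hit_py_alt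
  have h1 : PySem.List.pyRange 0 3 1 = [0, 1, 2] := by decide
  rw [h1]
  simp only [List.findSome?, pv_fd118, pv_md118]
  split_ifs <;> first | rfl | omega | (simp_all only [Option.some.injEq]; omega)
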